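-- pv_equiv track=rewrite | github.com/EZ32Inc/ai-embedded-lab | ael/verification_model.py | summarize_resource_keys
-- ===== SOURCE A (Python) =====
-- from typing import Any, Callable, Dict, List, Tuple
--
-- def summarize_resource_keys(keys: List[str] | None) -> Dict[str, Any]:
--     raw = list(keys or [])
--     summary: Dict[str, Any] = {
--         "dut_ids": [],
--         "control_instrument_endpoints": [],
--         "control_instrument_configs": [],
--         "controller_endpoints": [],
--         "controller_configs": [],
--         "serial_ports": [],
--         "instrument_endpoints": [],
--         "other": [],
--     }
--     def _append_unique(name: str, value: str) -> None:
--         bucket = summary.setdefault(name, [])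
--         if value not in bucket:
--             bucket.append(value)
--
--     for key in raw:
--         text = str(key or "").strip()
--         if not text:
--             continue
--         if text.startswith("dut:"):
--             _append_unique("dut_ids", text.split(":", 1)[1])
--         elif text.startswith("probe:"):
--             value = text.split(":", 1)[1]
--             _append_unique("control_instrument_endpoints", value)
--             _append_unique("controller_endpoints", value)
--         elif text.startswith("probe_path:"):
--             value = text.split(":", 1)[1]
--             _append_unique("control_instrument_configs", value)
--             _append_unique("controller_configs", value)
--         elif text.startswith("controller:"):
--             _append_unique("controller_endpoints", text.split(":", 1)[1])
--         elif text.startswith("controller_path:"):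
--             _append_unique("controller_configs", text.split(":", 1)[1])
--         elif text.startswith("serial:"):
--             _append_unique("serial_ports", text.split(":", 1)[1])
--         elif text.startswith("instrument:"):
--             _append_unique("instrument_endpoints", text.split(":", 1)[1])
--         else:
--             _append_unique("other", text)
--     return summary
-- ===== SOURCE B (Python) =====
-- from typing import Any, Dict, List
--
-- # bucket -> the bare prefixes that feed it
-- _SOURCES = [
--     ("dut_ids", ("dut",)),
--     ("control_instrument_endpoints", ("probe",)),
--     ("control_instrument_configs", ("probe_path",)),
--     ("controller_endpoints", ("probe", "controller")),
--     ("controller_configs", ("probe_path", "controller_path")),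
--     ("serial_ports", ("serial",)),
--     ("instrument_endpoints", ("instrument",)),
-- ]
-- _ALL = frozenset(p for _, ps in _SOURCES for p in ps)
--
-- def summarize_resource_keys(keys: List[str] | None) -> Dict[str, Any]:
--     texts = [t for t in (str(k or "").strip() for k in (keys or [])) if t]
--     split = [t.split(":", 1) for t in texts]
--     summary: Dict[str, Any] = {
--         name: list(dict.fromkeys(
--             p[1] for p in split if len(p) == 2 and p[0] in prefixes))
--         for name, prefixes in _SOURCES
--     }
--     summary["other"] = list(dict.fromkeys(
--         t for t, p in zip(texts, split) if len(p) == 1 or p[0] not in _ALL))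
--     return summary
-- ===== Notes on version B (the rewrite author's own statement) =====
-- stated objective: faster
-- what changed: B replaces A's single pass that dispatches each key through an elif chain and mutates buckets in place (deduping with a linear 'value not in bucket' scan) with a staged pipeline: strip and split all keys once, then build each bucket independently by its own filtering pass deduped via dict.fromkeys hashing, plus a final zip pass for 'other'.
import Mathlib
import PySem

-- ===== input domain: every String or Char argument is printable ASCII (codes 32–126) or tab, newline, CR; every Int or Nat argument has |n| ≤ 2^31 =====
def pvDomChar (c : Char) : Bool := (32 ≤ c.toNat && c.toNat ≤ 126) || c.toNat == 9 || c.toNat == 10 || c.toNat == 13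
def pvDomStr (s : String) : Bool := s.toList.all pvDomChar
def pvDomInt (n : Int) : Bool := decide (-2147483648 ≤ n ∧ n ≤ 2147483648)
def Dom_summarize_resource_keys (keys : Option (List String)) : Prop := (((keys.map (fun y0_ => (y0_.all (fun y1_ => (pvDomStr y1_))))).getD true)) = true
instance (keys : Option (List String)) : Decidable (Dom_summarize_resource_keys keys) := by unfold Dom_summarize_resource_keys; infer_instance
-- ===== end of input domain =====

-- B replaces A's single dispatch-and-mutate loop (which dedups by a linear 'value not in bucket'
-- scan) by a staged pipeline: strip and split all keys once, then build each bucket independently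
-- by its own filtering pass deduped via dict.fromkeys hashing (objective: faster, measured by the
-- timing run). A returns a fresh dict; no argument is mutated.

-- ===== PORT A =====
-- _append_unique: bucket = summary.setdefault(name, []); if value not in bucket: bucket.append(value)
def pvAppendUnique (summary : PySem.Dict String (List String)) (name value : String) :
    PySem.Dict String (List String) :=
  let dd := summary.setdefault name []
  let bucket := dd.getD name []
  if value ∈ bucket then dd else dd.insert name (bucket ++ [value])

-- text.split(":", 1)[1] — at every call site text contains ':', so index 1 is in range and the getD "" is never used
def pvSplitVal (text : String) : String :=
  (PySem.List.pyGet? ((PySem.Str.splitMax? text ":" 1).getD []) 1).getD ""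

def pvStepA (summary : PySem.Dict String (List String)) (key : String) :
    PySem.Dict String (List String) :=
  let text := PySem.Str.strip (if key == "" then "" else key)   -- str(key or "").strip()
  if text == "" then summary
  else if PySem.Str.startswith text "dut:" then
    pvAppendUnique summary "dut_ids" (pvSplitVal text)
  else if PySem.Str.startswith text "probe:" then
    let value := pvSplitVal text
    pvAppendUnique (pvAppendUnique summary "control_instrument_endpoints" value) "controller_endpoints" value
  else if PySem.Str.startswith text "probe_path:" then
    let value := pvSplitVal text
    pvAppendUnique (pvAppendUnique summary "control_instrument_configs" value) "controller_configs" value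
  else if PySem.Str.startswith text "controller:" then
    pvAppendUnique summary "controller_endpoints" (pvSplitVal text)
  else if PySem.Str.startswith text "controller_path:" then
    pvAppendUnique summary "controller_configs" (pvSplitVal text)
  else if PySem.Str.startswith text "serial:" then
    pvAppendUnique summary "serial_ports" (pvSplitVal text)
  else if PySem.Str.startswith text "instrument:" then
    pvAppendUnique summary "instrument_endpoints" (pvSplitVal text)
  else
    pvAppendUnique summary "other" text

def summarize_resource_keys (keys : Option (List String)) : List (String × List String) :=
  let raw := keys.getD []                     -- list(keys or [])
  let summary : PySem.Dict String (List String) := PySem.Dict.ofList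
    [("dut_ids", []), ("control_instrument_endpoints", []), ("control_instrument_configs", []),
     ("controller_endpoints", []), ("controller_configs", []), ("serial_ports", []),
     ("instrument_endpoints", []), ("other", [])]
  (raw.foldl pvStepA summary).items

-- ===== PORT B =====
-- _SOURCES: bucket -> the bare prefixes that feed it
def pvSources : List (String × List String) :=
  [("dut_ids", ["dut"]),
   ("control_instrument_endpoints", ["probe"]),
   ("control_instrument_configs", ["probe_path"]),
   ("controller_endpoints", ["probe", "controller"]),
   ("controller_configs", ["probe_path", "controller_path"]),
   ("serial_ports", ["serial"]),
   ("instrument_endpoints", ["instrument"])]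

-- _ALL = frozenset(p for _, ps in _SOURCES for p in ps)
def pvAllPrefixes : PySem.Set String := PySem.Set.ofList (pvSources.flatMap (·.2))

-- p[0] is ported as headD "" (each p is a nonempty split result); p[1] as pyGet? (len(p) == 2 holds there)
def summarize_resource_keys_alt (keys : Option (List String)) : List (String × List String) :=
  let texts := ((keys.getD []).map (fun k => PySem.Str.strip (if k == "" then "" else k))).filter
      (fun t => !(t == ""))                                    -- [t for t in (str(k or "").strip() …) if t]
  let split := texts.map (fun t => (PySem.Str.splitMax? t ":" 1).getD [])   -- [t.split(":", 1) for t in texts]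
  let summary := pvSources.foldl (fun d nb =>
      d.insert nb.1 (PySem.List.dedup
        ((split.filter (fun p => p.length == 2 && nb.2.contains (p.headD ""))).map
          (fun p => (PySem.List.pyGet? p 1).getD "")))) PySem.Dict.empty
  let summary := summary.insert "other" (PySem.List.dedup
      (((texts.zip split).filter
          (fun tp => tp.2.length == 1 || !(PySem.Set.contains pvAllPrefixes (tp.2.headD "")))).map (·.1)))
  summary.items

-- ===== PRECONDITION & SPEC =====
def Spec_summarize_resource_keys (keys : Option (List String)) (out : List (String × List String)) : Prop := out = summarize_resource_keys_alt keys
instance (keys : Option (List String)) (out : List (String × List String)) : Decidable (Spec_summarize_resource_keys keys out) := by unfold Spec_summarize_resource_keys; infer_instance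

-- ===== CLAIM (what is proved, stated in full; the proofs are below) =====
def Claim_equal_summarize_resource_keys : Prop := ∀ (keys : Option (List String)), Dom_summarize_resource_keys keys → Spec_summarize_resource_keys keys (summarize_resource_keys keys)

-- ===== LEMMAS AND PROOFS =====

theorem pv_go_zero (fuel : Nat) (l cur : List Char) (accs : List (List Char)) :
    PySem.Chars.splitOnMax.go [':'] fuel 0 l cur accs = accs.reverse ++ [cur.reverse ++ l] := by
  cases fuel with
  | zero => simp [PySem.Chars.splitOnMax.go]
  | succ f => cases l with
    | nil => simp [PySem.Chars.splitOnMax.go]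
    | cons c rest => simp [PySem.Chars.splitOnMax.go]

theorem pv_go_one : ∀ (l : List Char) (fuel : Nat), l.length < fuel →
    ∀ (cur : List Char) (accs : List (List Char)),
    PySem.Chars.splitOnMax.go [':'] fuel 1 l cur accs =
      if ':' ∈ l then accs.reverse ++ [cur.reverse ++ l.takeWhile (· ≠ ':'), (l.dropWhile (· ≠ ':')).tail]
      else accs.reverse ++ [cur.reverse ++ l] := by
  intro l
  induction l with
  | nil =>
    intro fuel h cur accs
    cases fuel with
    | zero => omega
    | succ f => simp [PySem.Chars.splitOnMax.go]
  | cons c rest ih =>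
    intro fuel h cur accs
    cases fuel with
    | zero => omega
    | succ f =>
      by_cases hc : c = ':'
      · subst hc
        simp only [PySem.Chars.splitOnMax.go]
        norm_num
        rw [pv_go_zero]
        simp
      · simp only [PySem.Chars.splitOnMax.go]
        have hpre : [':'].isPrefixOf (c :: rest) = false := by
          simp [List.isPrefixOf_cons₂, Ne.symm hc]
        simp only [hpre]
        norm_num
        rw [ih f (by simpa using h)]
        by_cases hm : ':' ∈ rest
        · simp [hm, hc]
        · simp [hm, Ne.symm hc]

theorem pv_splitOnMax_one (c : List Char) :
    PySem.Chars.splitOnMax c [':'] 1 =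
      if ':' ∈ c then [c.takeWhile (· ≠ ':'), (c.dropWhile (· ≠ ':')).tail] else [c] := by
  show PySem.Chars.splitOnMax.go [':'] (c.length + 1) 1 c [] [] = _
  rw [pv_go_one c (c.length + 1) (by omega)]
  split <;> simp

theorem pv_splitMax?_one (t : String) :
    PySem.Str.splitMax? t ":" 1 =
      some (if ':' ∈ t.toList then
              [String.ofList (t.toList.takeWhile (· ≠ ':')),
               String.ofList ((t.toList.dropWhile (· ≠ ':')).tail)]
            else [t]) := by
  show Option.map _ (PySem.Chars.splitMax? t.toList ":".toList 1) = _
  have h : (":" : String).toList = [':'] := rfl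
  rw [h]
  simp only [PySem.Chars.splitMax?]
  norm_num
  rw [pv_splitOnMax_one]
  split <;> simp [String.ofList]

theorem pv_tw_app (p rest : List Char) (hp : ':' ∉ p) :
    ((p ++ ':' :: rest).takeWhile (· ≠ ':') = p) ∧
    ((p ++ ':' :: rest).dropWhile (· ≠ ':') = ':' :: rest) := by
  induction p with
  | nil => simp
  | cons a as ih =>
    have ha : a ≠ ':' := fun h => hp (h ▸ List.mem_cons_self)
    have has : ':' ∉ as := fun h => hp (List.mem_cons_of_mem _ h)
    obtain ⟨h1, h2⟩ := ih has
    refine ⟨?_, ?_⟩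
    · rw [List.cons_append, List.takeWhile_cons, if_pos (by simpa using ha), h1]
    · rw [List.cons_append, List.dropWhile_cons, if_pos (by simpa using ha), h2]

theorem pv_prefix_iff (c p : List Char) (hp : ':' ∉ p) :
    (p ++ [':']) <+: c ↔ (':' ∈ c ∧ c.takeWhile (· ≠ ':') = p) := by
  constructor
  · rintro ⟨rest, hr⟩
    have hc : c = p ++ ':' :: rest := by rw [← hr]; simp
    subst hc
    exact ⟨by simp, (pv_tw_app p rest hp).1⟩
  · rintro ⟨hc, htw⟩
    cases hd : c.dropWhile (· ≠ ':') with
    | nil =>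
      exfalso
      have : c = c.takeWhile (· ≠ ':') := by
        conv_lhs => rw [← List.takeWhile_append_dropWhile (p := (· ≠ ':')) (l := c)]
        rw [hd]; simp
      rw [this, htw] at hc
      exact hp hc
    | cons d ds =>
      have hhead : (fun x => decide (x ≠ ':')) d = false := by
        have h' := List.head?_dropWhile_not (p := fun x => decide (x ≠ ':')) (l := c)
        rw [hd] at h'
        simpa using h'
      simp at hhead
      subst hhead
      refine ⟨ds, ?_⟩
      have := List.takeWhile_append_dropWhile (p := (· ≠ ':')) (l := c)
      rw [htw, hd] at this
      simpa using this

-- startswith against "p:" when text contains a colon: decided by the chunk before the first colon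
theorem pv_sw_eq (t ps : String) (p : List Char) (hp : ':' ∉ p) (hps : ps.toList = p ++ [':'])
    (hc : ':' ∈ t.toList) :
    PySem.Str.startswith t ps = decide (t.toList.takeWhile (· ≠ ':') = p) := by
  show PySem.Chars.startswith t.toList ps.toList = _
  rw [hps]
  by_cases h : t.toList.takeWhile (· ≠ ':') = p
  · simp only [h, decide_true]
    exact (PySem.Chars.startswith_iff _ _).mpr ((pv_prefix_iff t.toList p hp).mpr ⟨hc, h⟩)
  · simp only [h, decide_false]
    rw [← Bool.not_eq_true]
    intro hsw
    exact h ((pv_prefix_iff t.toList p hp).mp ((PySem.Chars.startswith_iff _ _).mp hsw)).2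

theorem pv_sw_false (t ps : String) (p : List Char) (hp : ':' ∉ p) (hps : ps.toList = p ++ [':'])
    (hc : ':' ∉ t.toList) :
    PySem.Str.startswith t ps = false := by
  show PySem.Chars.startswith t.toList ps.toList = false
  rw [← Bool.not_eq_true]
  intro hsw
  rw [hps] at hsw
  exact hc ((pv_prefix_iff t.toList p hp).mp ((PySem.Chars.startswith_iff _ _).mp hsw)).1

theorem pv_ofList_eq_iff (p : List Char) (s : String) : String.ofList p = s ↔ p = s.toList := by
  constructor
  · intro h; rw [← h, String.toList_ofList]
  · intro h; rw [h]; exact String.ofList_toList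

-- ---- classification of one key into (bucket, value) pairs, in A's append order ----

def pvAddVal (b : List String) (v : String) : List String := if v ∈ b then b else b ++ [v]

def pvStepP (d : PySem.Dict String (List String)) (p : String × String) :
    PySem.Dict String (List String) := pvAppendUnique d p.1 p.2

def pvClassifyText (t : String) : List (String × String) :=
  match (PySem.Str.splitMax? t ":" 1).getD [] with
  | [a, b] =>
    if a = "dut" then [("dut_ids", b)]
    else if a = "probe" then [("control_instrument_endpoints", b), ("controller_endpoints", b)]
    else if a = "probe_path" then [("control_instrument_configs", b), ("controller_configs", b)]
    else if a = "controller" then [("controller_endpoints", b)]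
    else if a = "controller_path" then [("controller_configs", b)]
    else if a = "serial" then [("serial_ports", b)]
    else if a = "instrument" then [("instrument_endpoints", b)]
    else [("other", t)]
  | _ => [("other", t)]

def pvClassify (key : String) : List (String × String) :=
  let text := PySem.Str.strip (if key == "" then "" else key)
  if text = "" then [] else pvClassifyText text

set_option maxHeartbeats 1600000 in
theorem pv_stepA_classify (d : PySem.Dict String (List String)) (key : String) :
    pvStepA d key = (pvClassify key).foldl pvStepP d := by
  unfold pvStepA pvClassify
  by_cases h0 : (PySem.Str.strip (if key == "" then "" else key) == "") = true
  · simp only [h0, if_true]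
    simp at h0
    simp [h0]
  · simp only [h0]
    set t := PySem.Str.strip (if key == "" then "" else key) with ht
    simp only [Bool.not_eq_true] at h0
    have h0' : ¬ (t = "") := by simpa using h0
    rw [if_neg h0']
    unfold pvClassifyText
    rw [pv_splitMax?_one t]
    by_cases hc : ':' ∈ t.toList
    · simp only [hc, if_true, Option.getD_some]
      have hval : pvSplitVal t =
          String.ofList ((t.toList.dropWhile (· ≠ ':')).tail) := by
        unfold pvSplitVal
        rw [pv_splitMax?_one t]
        simp [hc, PySem.List.pyGet?, PySem.List.pyIdx?]
      rw [pv_sw_eq t "dut:" "dut".toList (by decide) (by decide) hc,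
          pv_sw_eq t "probe:" "probe".toList (by decide) (by decide) hc,
          pv_sw_eq t "probe_path:" "probe_path".toList (by decide) (by decide) hc,
          pv_sw_eq t "controller:" "controller".toList (by decide) (by decide) hc,
          pv_sw_eq t "controller_path:" "controller_path".toList (by decide) (by decide) hc,
          pv_sw_eq t "serial:" "serial".toList (by decide) (by decide) hc,
          pv_sw_eq t "instrument:" "instrument".toList (by decide) (by decide) hc,
          hval]
      simp only [pv_ofList_eq_iff, decide_eq_true_eq, Bool.false_eq_true, if_false]
      split_ifs <;> rfl
    · simp only [hc, if_false, Option.getD_some]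
      rw [pv_sw_false t "dut:" "dut".toList (by decide) (by decide) hc,
          pv_sw_false t "probe:" "probe".toList (by decide) (by decide) hc,
          pv_sw_false t "probe_path:" "probe_path".toList (by decide) (by decide) hc,
          pv_sw_false t "controller:" "controller".toList (by decide) (by decide) hc,
          pv_sw_false t "controller_path:" "controller_path".toList (by decide) (by decide) hc,
          pv_sw_false t "serial:" "serial".toList (by decide) (by decide) hc,
          pv_sw_false t "instrument:" "instrument".toList (by decide) (by decide) hc]
      simp [List.foldl, pvStepP]

theorem pv_fold_flat : ∀ (raw : List String) (d : PySem.Dict String (List String)),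
    raw.foldl pvStepA d = (raw.flatMap pvClassify).foldl pvStepP d := by
  intro raw
  induction raw with
  | nil => intro d; rfl
  | cons k ks ih =>
    intro d
    simp only [List.foldl_cons, List.flatMap_cons, List.foldl_append]
    rw [pv_stepA_classify, ih]

-- one pvAppendUnique at an existing key rewrites that key's value in place
theorem pv_au_items (d : PySem.Dict String (List String)) (n v : String)
    (hnd : d.keys.Nodup) (hn : n ∈ d.keys) :
    (pvAppendUnique d n v).items =
      d.items.map (fun kv => if kv.1 = n then (kv.1, pvAddVal kv.2 v) else kv) := by
  have hcon : d.contains n = true := (PySem.Dict.contains_iff_mem_keys d n).mpr hn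
  unfold pvAppendUnique
  rw [PySem.Dict.setdefault_of_contains d _ hcon]
  by_cases hv : v ∈ d.getD n []
  · simp only [hv, if_true]
    conv_lhs => rw [← List.map_id d.items]
    apply List.map_congr_left
    intro kv hkv
    by_cases he : kv.1 = n
    · have h2 : d.getD kv.1 [] = kv.2 := PySem.Dict.getD_of_mem_items d (by simpa using hkv) hnd []
      have hv2 : v ∈ kv.2 := by rw [← h2, he]; exact hv
      rw [if_pos he]
      simp [pvAddVal, hv2]
    · simp [he]
  · simp only [hv, if_false]
    rw [PySem.Dict.items_insert, if_pos hcon]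
    apply List.map_congr_left
    intro kv hkv
    by_cases he : kv.1 = n
    · have h2 : d.getD kv.1 [] = kv.2 := PySem.Dict.getD_of_mem_items d (by simpa using hkv) hnd []
      have h3 : kv.2 = d.getD n [] := by rw [← h2, he]
      simp [he, pvAddVal, h3, hv]
    · simp [he]

theorem pv_au_keys (d : PySem.Dict String (List String)) (n v : String)
    (hnd : d.keys.Nodup) (hn : n ∈ d.keys) :
    (pvAppendUnique d n v).keys = d.keys := by
  show (pvAppendUnique d n v).items.map (·.1) = d.items.map (·.1)
  rw [pv_au_items d n v hnd hn, List.map_map]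
  apply List.map_congr_left
  intro kv _
  by_cases he : kv.1 = n <;> simp [he]

theorem pv_fold_items : ∀ (ps : List (String × String)) (d : PySem.Dict String (List String)),
    d.keys.Nodup → (∀ p ∈ ps, p.1 ∈ d.keys) →
    (ps.foldl pvStepP d).items =
      d.items.map (fun kv =>
        (kv.1, (ps.filter (fun p => p.1 == kv.1)).foldl (fun b p => pvAddVal b p.2) kv.2)) := by
  intro ps
  induction ps with
  | nil => intro d _ _; simp
  | cons p ps ih =>
    intro d hnd hmem
    have hp : p.1 ∈ d.keys := hmem p List.mem_cons_self
    have hkeys : (pvStepP d p).keys = d.keys := pv_au_keys d p.1 p.2 hnd hp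
    simp only [List.foldl_cons]
    rw [ih (pvStepP d p) (hkeys ▸ hnd) (fun q hq => hkeys ▸ hmem q (List.mem_cons_of_mem _ hq))]
    show ((pvAppendUnique d p.1 p.2).items).map _ = _
    rw [pv_au_items d p.1 p.2 hnd hp, List.map_map]
    apply List.map_congr_left
    intro kv _
    by_cases he : p.1 = kv.1
    · simp [Function.comp, he, List.filter_cons]
    · simp [Function.comp, he, List.filter_cons, Ne.symm he]

theorem pv_foldl_addVal (xs : List String) : xs.foldl pvAddVal [] = PySem.List.dedup xs := by
  rw [PySem.List.dedup_eq_ofList, PySem.Set.ofList_eq_foldl]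
  apply PySem.List.foldl_congr_mem
  intro acc x _
  simp [pvAddVal, PySem.Set.add, PySem.Set.contains]

theorem pv_flatMap_filter {β : Type} (l : List String) (g : String → List β) :
    ((l.filter (fun t => !(t == ""))).flatMap g) =
      l.flatMap (fun t => if t = "" then [] else g t) := by
  induction l with
  | nil => rfl
  | cons x xs ih =>
    by_cases hx : x = "" <;> simp [List.filter_cons, hx, ih]

theorem pv_filter_map_flatMap {α β : Type} (l : List α) (q : α → Bool) (g : α → β) :
    (l.filter q).map g = l.flatMap (fun x => if q x then [g x] else []) := by
  induction l with
  | nil => rfl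
  | cons x xs ih =>
    by_cases hx : q x <;> simp [List.filter_cons, hx, ih]

theorem pv_map_filter_flatMap {α β γ : Type} (l : List α) (g : α → List β) (q : β → Bool) (h : β → γ) :
    ((l.flatMap g).filter q).map h = l.flatMap (fun x => ((g x).filter q).map h) := by
  induction l with
  | nil => rfl
  | cons x xs ih => simp [List.filter_append, ih]

-- per-text contribution to a non-"other" bucket
theorem pv_per_text (n : String) (P : List String) (hP : (n, P) ∈ pvSources) (t : String) :
    ((pvClassifyText t).filter (fun p => p.1 == n)).map (·.2) =
      (if (((PySem.Str.splitMax? t ":" 1).getD []).length == 2 &&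
            P.contains ((((PySem.Str.splitMax? t ":" 1).getD []).headD ""))) = true
       then [(PySem.List.pyGet? ((PySem.Str.splitMax? t ":" 1).getD []) 1).getD ""] else []) := by
  simp only [pvSources, List.mem_cons, List.not_mem_nil, or_false, Prod.mk.injEq] at hP
  unfold pvClassifyText
  rw [pv_splitMax?_one t]
  by_cases hc : ':' ∈ t.toList
  · simp only [hc, if_true, Option.getD_some]
    set a := String.ofList (t.toList.takeWhile (· ≠ ':')) with ha
    set b := String.ofList ((t.toList.dropWhile (· ≠ ':')).tail) with hb
    by_cases e1 : a = "dut"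
    · rcases hP with ⟨h1,h2⟩|⟨h1,h2⟩|⟨h1,h2⟩|⟨h1,h2⟩|⟨h1,h2⟩|⟨h1,h2⟩|⟨h1,h2⟩ <;>
        subst h1 <;> subst h2 <;> simp [e1, PySem.List.pyGet?, PySem.List.pyIdx?]
    · by_cases e2 : a = "probe"
      · rcases hP with ⟨h1,h2⟩|⟨h1,h2⟩|⟨h1,h2⟩|⟨h1,h2⟩|⟨h1,h2⟩|⟨h1,h2⟩|⟨h1,h2⟩ <;>
          subst h1 <;> subst h2 <;> simp [e1, e2, PySem.List.pyGet?, PySem.List.pyIdx?]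
      · by_cases e3 : a = "probe_path"
        · rcases hP with ⟨h1,h2⟩|⟨h1,h2⟩|⟨h1,h2⟩|⟨h1,h2⟩|⟨h1,h2⟩|⟨h1,h2⟩|⟨h1,h2⟩ <;>
            subst h1 <;> subst h2 <;> simp [e1, e2, e3, PySem.List.pyGet?, PySem.List.pyIdx?]
        · by_cases e4 : a = "controller"
          · rcases hP with ⟨h1,h2⟩|⟨h1,h2⟩|⟨h1,h2⟩|⟨h1,h2⟩|⟨h1,h2⟩|⟨h1,h2⟩|⟨h1,h2⟩ <;>
              subst h1 <;> subst h2 <;> simp [e1, e2, e3, e4, PySem.List.pyGet?, PySem.List.pyIdx?]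
          · by_cases e5 : a = "controller_path"
            · rcases hP with ⟨h1,h2⟩|⟨h1,h2⟩|⟨h1,h2⟩|⟨h1,h2⟩|⟨h1,h2⟩|⟨h1,h2⟩|⟨h1,h2⟩ <;>
                subst h1 <;> subst h2 <;> simp [e1, e2, e3, e4, e5, PySem.List.pyGet?, PySem.List.pyIdx?]
            · by_cases e6 : a = "serial"
              · rcases hP with ⟨h1,h2⟩|⟨h1,h2⟩|⟨h1,h2⟩|⟨h1,h2⟩|⟨h1,h2⟩|⟨h1,h2⟩|⟨h1,h2⟩ <;>
                  subst h1 <;> subst h2 <;> simp [e1, e2, e3, e4, e5, e6, PySem.List.pyGet?, PySem.List.pyIdx?]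
              · by_cases e7 : a = "instrument"
                · rcases hP with ⟨h1,h2⟩|⟨h1,h2⟩|⟨h1,h2⟩|⟨h1,h2⟩|⟨h1,h2⟩|⟨h1,h2⟩|⟨h1,h2⟩ <;>
                    subst h1 <;> subst h2 <;> simp [e1, e2, e3, e4, e5, e6, e7, PySem.List.pyGet?, PySem.List.pyIdx?]
                · rcases hP with ⟨h1,h2⟩|⟨h1,h2⟩|⟨h1,h2⟩|⟨h1,h2⟩|⟨h1,h2⟩|⟨h1,h2⟩|⟨h1,h2⟩ <;>
                    subst h1 <;> subst h2 <;> simp [e1, e2, e3, e4, e5, e6, e7]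
  · simp only [hc, if_false, Option.getD_some]
    rcases hP with ⟨h1,h2⟩|⟨h1,h2⟩|⟨h1,h2⟩|⟨h1,h2⟩|⟨h1,h2⟩|⟨h1,h2⟩|⟨h1,h2⟩ <;> subst h1 <;> simp

-- per-text contribution to the "other" bucket
theorem pv_per_text_other (t : String) :
    ((pvClassifyText t).filter (fun p => p.1 == "other")).map (·.2) =
      (if (((PySem.Str.splitMax? t ":" 1).getD []).length == 1 ||
            !(PySem.Set.contains pvAllPrefixes ((((PySem.Str.splitMax? t ":" 1).getD []).headD "")))) = true
       then [t] else []) := by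
  unfold pvClassifyText
  rw [pv_splitMax?_one t]
  by_cases hc : ':' ∈ t.toList
  · simp only [hc, if_true, Option.getD_some]
    set a := String.ofList (t.toList.takeWhile (· ≠ ':')) with ha
    have hall : pvAllPrefixes = ["dut", "probe", "probe_path", "controller",
        "controller_path", "serial", "instrument"] := by decide
    rw [hall]
    by_cases e1 : a = "dut"
    · simp [e1]
    · by_cases e2 : a = "probe"
      · simp [e2]
      · by_cases e3 : a = "probe_path"
        · simp [e3]
        · by_cases e4 : a = "controller"
          · simp [e4]
          · by_cases e5 : a = "controller_path"
            · simp [e5]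
            · by_cases e6 : a = "serial"
              · simp [e6]
              · by_cases e7 : a = "instrument"
                · simp [e7]
                · simp [e1, e2, e3, e4, e5, e6, e7, PySem.Set.contains]
  · simp [hc]

theorem pv_classify_names (t : String) : ∀ p ∈ pvClassifyText t,
    p.1 ∈ ["dut_ids", "control_instrument_endpoints", "control_instrument_configs",
           "controller_endpoints", "controller_configs", "serial_ports",
           "instrument_endpoints", "other"] := by
  intro p hp
  unfold pvClassifyText at hp
  rcases hs : (PySem.Str.splitMax? t ":" 1).getD [] with _ | ⟨a, _ | ⟨b, _ | _⟩⟩ <;>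
    rw [hs] at hp <;> simp only at hp
  · simp at hp; simp [hp]
  · simp at hp; simp [hp]
  · split_ifs at hp <;> simp at hp <;>
      first
      | (rcases hp with hp | hp <;> simp [hp])
      | simp [hp]
  · simp at hp; simp [hp]

-- zip of a list with its own map
theorem pv_zip_self_map {α β : Type} (l : List α) (f : α → List β) :
    l.zip (l.map f) = l.map (fun x => (x, f x)) := by
  induction l with
  | nil => rfl
  | cons x xs ih => simp [ih]

-- the per-bucket value list of A equals that of B (main list-level bridge)
theorem pv_bucket_eq (n : String) (P : List String) (hP : (n, P) ∈ pvSources) (texts : List String) :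
    ((texts.flatMap pvClassifyText).filter (fun p => p.1 == n)).map (·.2) =
      ((texts.map (fun t => (PySem.Str.splitMax? t ":" 1).getD [])).filter
          (fun p => p.length == 2 && P.contains (p.headD ""))).map
        (fun p => (PySem.List.pyGet? p 1).getD "") := by
  rw [pv_map_filter_flatMap, List.filter_map, List.map_map, pv_filter_map_flatMap]
  simp only [Function.comp]
  exact congrArg (fun f => List.flatMap f texts) (funext fun t => pv_per_text n P hP t)

theorem pv_bucket_other_eq (texts : List String) :
    ((texts.flatMap pvClassifyText).filter (fun p => p.1 == "other")).map (·.2) =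
      (((texts.zip (texts.map (fun t => (PySem.Str.splitMax? t ":" 1).getD []))).filter
          (fun tp => tp.2.length == 1 || !(PySem.Set.contains pvAllPrefixes (tp.2.headD "")))).map (·.1)) := by
  rw [pv_map_filter_flatMap, pv_zip_self_map, List.filter_map, List.map_map, pv_filter_map_flatMap]
  simp only [Function.comp]
  exact congrArg (fun f => List.flatMap f texts) (funext fun t => pv_per_text_other t)

theorem pv_main (keys : Option (List String)) :
    summarize_resource_keys keys = summarize_resource_keys_alt keys := by
  simp only [summarize_resource_keys, summarize_resource_keys_alt]
  rw [pv_fold_flat]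
  have hflat : (keys.getD []).flatMap pvClassify =
      (((keys.getD []).map (fun k => PySem.Str.strip (if k == "" then "" else k))).filter
        (fun t => !(t == ""))).flatMap pvClassifyText := by
    rw [pv_flatMap_filter, List.flatMap_map]
    rfl
  rw [hflat]
  set texts := (((keys.getD []).map (fun k => PySem.Str.strip (if k == "" then "" else k))).filter
        (fun t => !(t == ""))) with htexts
  rw [pv_fold_items (texts.flatMap pvClassifyText) _ (by decide) (by
    intro p hp
    rcases List.mem_flatMap.mp hp with ⟨t, _, hpt⟩
    have h8 := pv_classify_names t p hpt
    have hk : (PySem.Dict.ofList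
        [("dut_ids", ([] : List String)), ("control_instrument_endpoints", []), ("control_instrument_configs", []),
         ("controller_endpoints", []), ("controller_configs", []), ("serial_ports", []),
         ("instrument_endpoints", []), ("other", [])]).keys =
        ["dut_ids", "control_instrument_endpoints", "control_instrument_configs",
         "controller_endpoints", "controller_configs", "serial_ports",
         "instrument_endpoints", "other"] := by decide
    rw [hk]
    exact h8)]
  -- B side: items of the fresh-key fold, then the appended "other" bucket
  have hcon : ∀ (V : String × List String → List String),
      ((pvSources.foldl (fun d nb => d.insert nb.1 (V nb)) PySem.Dict.empty).contains "other") = false := by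
    intro V
    rw [PySem.Dict.contains_eq_decide_mem_keys,
        PySem.Dict.keys_foldl_insert_key (key := fun nb => nb.1) (f := fun _ nb => V nb)]
    decide
  rw [PySem.Dict.items_insert_of_not_contains _ _ (hcon _)]
  rw [PySem.Dict.items_foldl_insert_fresh pvSources (fun nb => nb.1) _ PySem.Dict.empty
      (fun a _ => rfl) (by decide)]
  have hD0 : (PySem.Dict.ofList
      [("dut_ids", ([] : List String)), ("control_instrument_endpoints", []), ("control_instrument_configs", []),
       ("controller_endpoints", []), ("controller_configs", []), ("serial_ports", []),
       ("instrument_endpoints", []), ("other", [])]).items =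
      [("dut_ids", []), ("control_instrument_endpoints", []), ("control_instrument_configs", []),
       ("controller_endpoints", []), ("controller_configs", []), ("serial_ports", []),
       ("instrument_endpoints", []), ("other", [])] := by decide
  rw [hD0]
  simp only [pvSources, List.map_cons, List.map_nil, PySem.Dict.empty, PySem.Dict.items, List.nil_append,
    List.cons_append, List.cons.injEq, Prod.mk.injEq, true_and, and_true]
  refine ⟨?_, ?_, ?_, ?_, ?_, ?_, ?_, ?_⟩ <;>
    rw [← List.foldl_map (f := fun p : String × String => p.2) (g := pvAddVal), pv_foldl_addVal]
  · rw [pv_bucket_eq "dut_ids" ["dut"] (by decide)]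
  · rw [pv_bucket_eq "control_instrument_endpoints" ["probe"] (by decide)]
  · rw [pv_bucket_eq "control_instrument_configs" ["probe_path"] (by decide)]
  · rw [pv_bucket_eq "controller_endpoints" ["probe", "controller"] (by decide)]
  · rw [pv_bucket_eq "controller_configs" ["probe_path", "controller_path"] (by decide)]
  · rw [pv_bucket_eq "serial_ports" ["serial"] (by decide)]
  · rw [pv_bucket_eq "instrument_endpoints" ["instrument"] (by decide)]
  · rw [pv_bucket_other_eq]
-- ===== VERDICT (by name: the statement is the Claim_ definition above) =====
theorem summarize_resource_keys_spec : Claim_equal_summarize_resource_keys := by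
  intro keys _
  unfold Spec_summarize_resource_keys
  exact pv_main keys
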